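-- pv_equiv track=rewrite | github.com/Achira16/My_codes | atcs.py | printString
-- ===== SOURCE A (Python) =====
-- def printString(S):
-- 	plaintext = [None] * 5
-- 	freq = [0] * 26
-- 	freqSorted = [None] * 26
-- 	used = [0] * 26
-- 	for i in range(len(S)):
-- 		if S[i] != ' ':
-- 			freq[ord(S[i]) - 65] += 1
-- 	for i in range(26):
-- 		freqSorted[i] = freq[i]
-- 	T = "ETAOINSHRDLCUMWFGYPBVKJXQZ"
-- 	freqSorted.sort(reverse = True)
-- 	for i in range(5):
-- 		ch = -1
-- 		for j in range(26):
-- 			if freqSorted[i] == freq[j] and used[j] == 0: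
-- 				used[j] = 1
-- 				ch = j
-- 				break
--
-- 		if ch == -1:
-- 			break
-- 		x = ord(T[i]) - 65
-- 		x = x - ch
-- 		curr = ""
-- 		for k in range(len(S)):
-- 			if S[k] == ' ':
-- 				curr += " "
-- 				continue
-- 			y = ord(S[k]) - 65
-- 			y += x
--
-- 			if y < 0:
-- 				y += 26
-- 			if y > 25:
-- 				y -= 26
-- 			curr += chr(y + 65)
-- 		plaintext[i] = curr
-- 	return plaintext
-- ===== SOURCE B (Python) =====
-- def printString(S):
--     freq = [0] * 26
--     for c in S:
--         if c != ' ':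
--             freq[ord(c) - 65] += 1
--     # pick the five most frequent letter slots directly: sort the 26 indices by
--     # descending frequency, ties to the smaller index (key encodes the pair
--     # (-freq[j], j) as one integer, valid since 0 <= j < 26)
--     order = sorted(range(26), key=lambda j: 26 * -freq[j] + j)[:5]
--     T = "ETAOINSHRDLCUMWFGYPBVKJXQZ"
--     res = []
--     for i in range(5):
--         x = ord(T[i]) - 65 - order[i]
--         curr = []
--         for c in S:
--             if c == ' ':
--                 curr.append(' ')
--             else:
--                 y = ord(c) - 65 + x
--                 if y < 0:
--                     y += 26
--                 if y > 25:
--                     y -= 26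
--                 curr.append(chr(y + 65))
--         res.append(''.join(curr))
--     return res
-- ===== Notes on version B (the rewrite author's own statement) =====
-- stated objective: simpler
-- what changed: Replaced A's sorted-copy of the frequency values plus the used-array greedy value-matching scan (and the break/None machinery) by sorting the 26 letter indices once by descending frequency with ties to the smaller index and taking the first five.
import Mathlib
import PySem

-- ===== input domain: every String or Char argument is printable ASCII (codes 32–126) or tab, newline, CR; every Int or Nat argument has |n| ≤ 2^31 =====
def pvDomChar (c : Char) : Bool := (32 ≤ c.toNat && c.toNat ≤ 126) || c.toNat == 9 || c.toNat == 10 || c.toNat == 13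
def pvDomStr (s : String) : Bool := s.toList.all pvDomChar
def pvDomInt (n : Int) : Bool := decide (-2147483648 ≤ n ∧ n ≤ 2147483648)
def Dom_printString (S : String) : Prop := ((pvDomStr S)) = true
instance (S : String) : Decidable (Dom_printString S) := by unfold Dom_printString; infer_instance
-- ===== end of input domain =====

-- B replaces A's sorted-value + used-array greedy matching pass by sorting the 26
-- letter indices once (descending frequency, ties to the smaller index) and taking
-- the first five; objective: simpler.

-- helpers shared by both ports: the frequency pass and the per-character shift are
-- textually identical lines in both Python programs.
def pvFreq (S : String) : List Int :=
  S.toList.foldl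
    (fun freq c =>
      if c ≠ ' ' then
        PySem.List.pySetD freq ((c.toNat : Int) - 65)
          (PySem.List.pyGetD freq ((c.toNat : Int) - 65) 0 + 1)
      else freq)
    (List.replicate 26 0)

def pvShift (x : Int) (c : Char) : Char :=
  if c = ' ' then ' '
  else
    let y0 := ((c.toNat : Int)) - 65 + x
    let y1 := if y0 < 0 then y0 + 26 else y0
    let y2 := if y1 > 25 then y1 - 26 else y1
    Char.ofNat (y2 + 65).toNat

-- ===== PORT A =====
-- the inner 'for j in range(26): … break' scan of A
def pvScanA (v : Int) (freq used : List Int) : List Int → Option Int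
  | [] => none
  | j :: rest =>
      if v = PySem.List.pyGetD freq j 0 ∧ PySem.List.pyGetD used j 0 = 0 then some j
      else pvScanA v freq used rest

-- A builds curr by successive string concatenation
def pvDecryptA (S : String) (x : Int) : String :=
  String.ofList (S.toList.foldl (fun acc c => acc ++ [pvShift x c]) [])

def pvLoopA (S : String) (freq freqSorted : List Int) (i : Nat) (used : List Int)
    (plaintext : List (Option String)) : List (Option String) :=
  if _h : i < 5 then
    match pvScanA (PySem.List.pyGetD freqSorted (i : Int) 0) freq used
        (PySem.List.pyRange 0 26 1) with
    | none => plaintext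
    | some ch =>
        let T := "ETAOINSHRDLCUMWFGYPBVKJXQZ".toList
        let x := ((T.getD i 'A').toNat : Int) - 65 - ch
        pvLoopA S freq freqSorted (i + 1) (PySem.List.pySetD used ch 1)
          (plaintext.set i (some (pvDecryptA S x)))
  else plaintext
termination_by 5 - i

def printString (S : String) : List (Option String) :=
  let freq := pvFreq S
  let freqSorted := PySem.List.sorted freq (fun v => v) true
  pvLoopA S freq freqSorted 0 (List.replicate 26 0) (List.replicate 5 none)

-- ===== PORT B =====
-- sorted(range(26), key=lambda j: 26 * -freq[j] + j)[:5]
def pvOrder (freq : List Int) : List Int :=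
  (PySem.List.sorted (PySem.List.pyRange 0 26 1)
    (fun j => 26 * -(PySem.List.pyGetD freq j 0) + j) false).take 5

-- B collects the shifted characters and joins once
def pvDecryptB (S : String) (x : Int) : String :=
  String.ofList (S.toList.map (fun c => pvShift x c))

def printString_alt (S : String) : List (Option String) :=
  let freq := pvFreq S
  let order := pvOrder freq
  let T := "ETAOINSHRDLCUMWFGYPBVKJXQZ".toList
  (List.range 5).map (fun i =>
    some (pvDecryptB S (((T.getD i 'A').toNat : Int) - 65 - PySem.List.pyGetD order (i : Int) 0)))

-- ===== PRECONDITION & SPEC =====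
-- Pre_ excludes exactly the inputs on which A raises IndexError: a non-space
-- character c with ord(c)-65 outside [-26, 25] over- or under-runs the 26-slot
-- frequency list.
def Pre_printString (S : String) : Prop :=
  (S.toList.all fun c => decide (c = ' ') || (decide (39 ≤ c.toNat) && decide (c.toNat ≤ 90))) = true
instance (S : String) : Decidable (Pre_printString S) := by unfold Pre_printString; infer_instance

def pvWitness_printString : String := "AB"

def Spec_printString (S : String) (out : List (Option String)) : Prop := out = printString_alt S
instance (S : String) (out : List (Option String)) : Decidable (Spec_printString S out) := by
  unfold Spec_printString; infer_instance

-- ===== CLAIM (what is proved, stated in full; the proofs are below) =====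
def Claim_equal_printString : Prop :=
  ∀ (S : String), Dom_printString S → Pre_printString S → Spec_printString S (printString S)


-- ===== LEMMAS AND PROOFS =====

-- proof-only abbreviations
def pvK (freq : List Int) (j : Int) : Int := 26 * -(PySem.List.pyGetD freq j 0) + j

def pvIdx (freq : List Int) : List Int :=
  PySem.List.sorted (PySem.List.pyRange 0 26 1) (pvK freq) false

def pvUsedOf (js : List Int) : List Int :=
  js.foldl (fun u j => PySem.List.pySetD u j 1) (List.replicate 26 0)

lemma pvOrder_eq (freq : List Int) : pvOrder freq = (pvIdx freq).take 5 := rfl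

lemma length_pvFreq (S : String) : (pvFreq S).length = 26 := by
  unfold pvFreq
  have h : ∀ (l : List Char) (acc : List Int), acc.length = 26 →
      (l.foldl (fun freq c => if c ≠ ' ' then
          PySem.List.pySetD freq ((c.toNat : Int) - 65)
            (PySem.List.pyGetD freq ((c.toNat : Int) - 65) 0 + 1)
        else freq) acc).length = 26 := by
    intro l
    induction l with
    | nil => intro acc h; simpa using h
    | cons c cs ih =>
        intro acc h
        simp only [List.foldl_cons]
        apply ih
        split <;> simp [PySem.List.length_pySetD, h]
  exact h _ _ (by simp)

lemma pvIdx_perm (freq : List Int) : (pvIdx freq).Perm (PySem.List.pyRange 0 26 1) :=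
  PySem.List.sorted_perm _ _ _

lemma mem_pvIdx (freq : List Int) (j : Int) : j ∈ pvIdx freq ↔ 0 ≤ j ∧ j < 26 := by
  rw [(pvIdx_perm freq).mem_iff, PySem.List.mem_pyRange_one]

lemma nodup_pvIdx (freq : List Int) : (pvIdx freq).Nodup :=
  (pvIdx_perm freq).nodup_iff.mpr (PySem.List.nodup_pyRange_one _ _)

lemma length_pvIdx (freq : List Int) : (pvIdx freq).length = 26 := by
  rw [(pvIdx_perm freq).length_eq, PySem.List.length_pyRange_one]; rfl

lemma pairwise_pvIdx (freq : List Int) :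
    (pvIdx freq).Pairwise (fun a b => pvK freq a < pvK freq b) := by
  have h1 := PySem.List.sorted_pairwise (PySem.List.pyRange 0 26 1) (pvK freq)
  have h2 : (pvIdx freq).Pairwise (fun a b => a ≠ b) := nodup_pvIdx freq
  refine (h1.and h2).imp_of_mem ?_
  intro a b ha hb hab
  have ha' := (mem_pvIdx freq a).mp ha
  have hb' := (mem_pvIdx freq b).mp hb
  have hK : pvK freq a ≠ pvK freq b := by
    intro h
    apply hab.2
    unfold pvK at h
    omega
  exact lt_of_le_of_ne hab.1 hK

lemma mapf_pvIdx (freq : List Int) (hlen : freq.length = 26) :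
    PySem.List.sorted freq (fun v => v) true
      = (pvIdx freq).map (fun j => PySem.List.pyGetD freq j 0) := by
  have hperm1 : (PySem.List.sorted freq (fun v => v) true).Perm freq :=
    PySem.List.sorted_perm _ _ _
  have hmapR : (PySem.List.pyRange 0 26 1).map (fun j => PySem.List.pyGetD freq j 0) = freq := by
    have h := PySem.List.map_pyGetD_pyRange_zero freq 0
    rw [PySem.List.len_eq, hlen] at h
    norm_num at h
    exact h
  have hperm2 : ((pvIdx freq).map (fun j => PySem.List.pyGetD freq j 0)).Perm freq := by
    have := (pvIdx_perm freq).map (fun j => PySem.List.pyGetD freq j 0)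
    simpa [hmapR] using this
  have hs1 : (PySem.List.sorted freq (fun v => v) true).Pairwise (fun a b => b ≤ a) := by
    simpa using PySem.List.sorted_pairwise_rev freq (fun v => v)
  have hs2 : ((pvIdx freq).map (fun j => PySem.List.pyGetD freq j 0)).Pairwise
      (fun a b => b ≤ a) := by
    rw [List.pairwise_map]
    refine (pairwise_pvIdx freq).imp_of_mem ?_
    intro a b ha hb hlt
    have ha' := (mem_pvIdx freq a).mp ha
    have hb' := (mem_pvIdx freq b).mp hb
    unfold pvK at hlt
    omega
  exact List.eq_of_perm_of_sorted (fun a b _ _ h h' => le_antisymm h' h) hs1 hs2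
    (hperm1.trans hperm2.symm)

lemma pyGetD_pvUsedOf (js : List Int) (hb : ∀ j ∈ js, 0 ≤ j ∧ j < 26)
    (m : Int) (hm0 : 0 ≤ m) (hm : m < 26) :
    PySem.List.pyGetD (pvUsedOf js) m 0 = if m ∈ js then 1 else 0 := by
  have h : ∀ (l : List Int), (∀ j ∈ l, 0 ≤ j ∧ j < 26) → ∀ (acc : List Int), acc.length = 26 →
      PySem.List.pyGetD (l.foldl (fun u j => PySem.List.pySetD u j 1) acc) m 0
        = if m ∈ l then 1 else PySem.List.pyGetD acc m 0 := by
    intro l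
    induction l with
    | nil => intro _ acc _; simp
    | cons j rest ih =>
        intro hbl acc hacc
        have hj := hbl j (by simp)
        have hlen' : (PySem.List.pySetD acc j 1).length = 26 := by
          simp [PySem.List.length_pySetD, hacc]
        simp only [List.foldl_cons]
        rw [ih (fun x hx => hbl x (by simp [hx])) _ hlen']
        have hget : PySem.List.pyGetD (PySem.List.pySetD acc j 1) m 0
            = if m = j then 1 else PySem.List.pyGetD acc m 0 := by
          rw [PySem.List.pySetD_of_nonneg acc 1 hj.1,
            PySem.List.pyGetD_eq_getElem _ 0 hm0 (by simp [hacc]; omega),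
            List.getElem_set]
          by_cases hmj : m = j
          · simp [hmj]
          · have : ¬ (j.toNat = m.toNat) := by omega
            rw [if_neg this, if_neg hmj,
              PySem.List.pyGetD_eq_getElem _ 0 hm0 (by rw [hacc]; omega)]
        rw [hget]
        by_cases h1 : m ∈ rest <;> by_cases h2 : m = j <;> simp [h1, h2]
  unfold pvUsedOf
  rw [h js hb _ (by simp)]
  have : PySem.List.pyGetD (List.replicate 26 (0 : Int)) m 0 = 0 := by
    rw [PySem.List.pyGetD_eq_getElem _ 0 hm0 (by simp; omega), List.getElem_replicate]
  rw [this]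

lemma pvScanA_first (v : Int) (freq used : List Int) (js : List Int) (t : Int)
    (hs : js.Pairwise (· < ·)) (ht : t ∈ js)
    (hPt : v = PySem.List.pyGetD freq t 0 ∧ PySem.List.pyGetD used t 0 = 0)
    (hmin : ∀ j ∈ js, j < t →
      ¬(v = PySem.List.pyGetD freq j 0 ∧ PySem.List.pyGetD used j 0 = 0)) :
    pvScanA v freq used js = some t := by
  induction js with
  | nil => cases ht
  | cons j rest ih =>
      have hs' := (List.pairwise_cons.mp hs)
      by_cases hP : v = PySem.List.pyGetD freq j 0 ∧ PySem.List.pyGetD used j 0 = 0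
      · have hjt : j = t := by
          rcases List.mem_cons.mp ht with h | h
          · omega
          · exact absurd hP (hmin j (by simp) (hs'.1 t h))
        subst hjt
        simp only [pvScanA, if_pos hP]
      · have htr : t ∈ rest := by
          rcases List.mem_cons.mp ht with h | h
          · exact absurd (h ▸ hPt) hP
          · exact h
        simp only [pvScanA, if_neg hP]
        exact ih hs'.2 htr (fun x hx hxlt hPx => hmin x (by simp [hx]) hxlt hPx)

lemma take_snoc_pyGetD (l : List Int) (i : Nat) (hi : i < l.length) :
    l.take i ++ [PySem.List.pyGetD l (i : Int) 0] = l.take (i + 1) := by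
  have h1 : PySem.List.pyGetD l (i : Int) 0 = l[i] := by
    rw [PySem.List.pyGetD_eq_getElem _ 0 (by positivity) (by exact_mod_cast hi)]
    simp
  rw [h1, List.take_add_one, List.getElem?_eq_getElem hi]
  rfl

lemma pvScanA_step (freq : List Int) (hlen : freq.length = 26) (i : Nat) (hi : i < 5) :
    pvScanA (PySem.List.pyGetD (PySem.List.sorted freq (fun v => v) true) (i : Int) 0) freq
      (pvUsedOf ((pvIdx freq).take i)) (PySem.List.pyRange 0 26 1)
    = some (PySem.List.pyGetD (pvIdx freq) (i : Int) 0) := by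
  have hlenI := length_pvIdx freq
  have hnd := nodup_pvIdx freq
  have hpw := pairwise_pvIdx freq
  have hmemI := mem_pvIdx freq
  have hmap := mapf_pvIdx freq hlen
  rw [hmap]
  generalize hg : pvIdx freq = idx at hlenI hnd hpw hmemI ⊢
  have hi26 : i < idx.length := by omega
  have hti : PySem.List.pyGetD idx (i : Int) 0 = idx[i] := by
    rw [PySem.List.pyGetD_eq_getElem _ 0 (by positivity) (by exact_mod_cast hi26)]
    simp
  set t := idx[i] with htdef
  have htmem : t ∈ idx := List.getElem_mem hi26
  have htb := (hmemI t).mp htmem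
  have hbtake : ∀ j ∈ idx.take i, 0 ≤ j ∧ j < 26 := by
    intro j hj
    exact (hmemI j).mp (List.mem_of_mem_take hj)
  have htnot : t ∉ idx.take i := by
    intro hmem
    obtain ⟨p, hp, hpe⟩ := List.mem_iff_getElem.mp hmem
    have hpl : p < i := by
      have := hp
      simp [List.length_take] at this
      omega
    rw [List.getElem_take] at hpe
    have := hnd.getElem_inj_iff.mp hpe
    omega
  have hv : PySem.List.pyGetD (idx.map (fun j => PySem.List.pyGetD freq j 0)) (i : Int) 0
      = PySem.List.pyGetD freq t 0 := by
    rw [PySem.List.pyGetD_eq_getElem _ 0 (by positivity)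
      (by rw [List.length_map]; exact_mod_cast hi26)]
    simp [htdef]
  rw [hti, hv]
  refine pvScanA_first _ _ _ _ _ (PySem.List.pairwise_lt_pyRange_one 0 26) ?_ ?_ ?_
  · rw [PySem.List.mem_pyRange_one]; omega
  · exact ⟨rfl, by rw [pyGetD_pvUsedOf _ hbtake t htb.1 htb.2, if_neg htnot]⟩
  · intro j hjmem hjlt hPj
    have hjb : 0 ≤ j ∧ j < 26 := by
      rw [PySem.List.mem_pyRange_one] at hjmem; exact hjmem
    have hjnot : j ∉ idx.take i := by
      intro hmem
      rw [pyGetD_pvUsedOf _ hbtake j hjb.1 hjb.2, if_pos hmem] at hPj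
      exact absurd hPj.2 (by norm_num)
    have hjidx : j ∈ idx := (hmemI j).mpr hjb
    obtain ⟨p, hp, hpe⟩ := List.mem_iff_getElem.mp hjidx
    have hfj : PySem.List.pyGetD freq j 0 = PySem.List.pyGetD freq t 0 := hPj.1.symm
    have hpi : ¬ p < i := by
      intro hpl
      apply hjnot
      rw [List.mem_iff_getElem]
      exact ⟨p, by simp [List.length_take]; omega, by rw [List.getElem_take]; exact hpe⟩
    have hpne : p ≠ i := by
      intro h
      subst h
      rw [hpe] at htdef
      omega
    have hip : i < p := by omega
    have hK := List.pairwise_iff_getElem.mp hpw i p hi26 hp hip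
    rw [hpe] at hK
    unfold pvK at hK
    rw [htdef] at hfj
    rw [hfj] at hK
    omega

lemma pvUsedOf_snoc (js : List Int) (t : Int) :
    PySem.List.pySetD (pvUsedOf js) t 1 = pvUsedOf (js ++ [t]) := by
  simp [pvUsedOf, List.foldl_append]

lemma pvLoopA_spec (S : String) (freq : List Int) (hlen : freq.length = 26) :
    ∀ (k i : Nat), i + k = 5 → ∀ (pt : List (Option String)),
      pvLoopA S freq (PySem.List.sorted freq (fun v => v) true) i
          (pvUsedOf ((pvIdx freq).take i)) pt
        = (List.range' i k).foldl
            (fun p n =>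
              p.set n (some (pvDecryptA S
                ((("ETAOINSHRDLCUMWFGYPBVKJXQZ".toList.getD n 'A').toNat : Int) - 65
                  - PySem.List.pyGetD (pvIdx freq) (n : Int) 0)))) pt := by
  intro k
  induction k with
  | zero =>
      intro i hik pt
      have : i = 5 := by omega
      subst this
      rw [pvLoopA]
      simp
  | succ k ih =>
      intro i hik pt
      have hi : i < 5 := by omega
      have hi26 : i < (pvIdx freq).length := by rw [length_pvIdx]; omega
      rw [pvLoopA, dif_pos hi, pvScanA_step freq hlen i hi]
      dsimp only
      rw [pvUsedOf_snoc, take_snoc_pyGetD _ _ hi26, ih (i + 1) (by omega),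
        List.range'_succ, List.foldl_cons]

lemma pyGetD_take5 (l : List Int) (i : Nat) (hi : i < 5) (hl : 5 ≤ l.length) :
    PySem.List.pyGetD (l.take 5) (i : Int) 0 = PySem.List.pyGetD l (i : Int) 0 := by
  rw [PySem.List.pyGetD_eq_getElem _ 0 (by positivity)
      (by simp [List.length_take]; omega),
    PySem.List.pyGetD_eq_getElem _ 0 (by positivity) (by exact_mod_cast by omega : (i : Int) < (l.length : Int))]
  simp [List.getElem_take]

lemma pyGetD_pvOrder (freq : List Int) (i : Nat) (hi : i < 5) :
    PySem.List.pyGetD (pvOrder freq) (i : Int) 0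
      = PySem.List.pyGetD (pvIdx freq) (i : Int) 0 := by
  rw [pvOrder_eq]
  exact pyGetD_take5 _ i hi (by rw [length_pvIdx]; omega)

lemma pvDec_eq (S : String) (x : Int) : pvDecryptA S x = pvDecryptB S x := by
  unfold pvDecryptA pvDecryptB
  rw [PySem.List.foldl_append_singleton_eq_map (fun c => pvShift x c)]
  simp

-- ===== VERDICT (by name: the statement is the Claim_ definition above) =====
theorem printString_spec : Claim_equal_printString := by
  intro S _hD _hP
  unfold Spec_printString printString printString_alt
  have hlen := length_pvFreq S
  have h0 : pvUsedOf ((pvIdx (pvFreq S)).take 0) = List.replicate 26 0 := rfl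
  have hloop := pvLoopA_spec S (pvFreq S) hlen 5 0 (by omega) (List.replicate 5 none)
  rw [h0] at hloop
  simp only []
  rw [hloop]
  have hr : List.range' 0 5 = [0, 1, 2, 3, 4] := rfl
  have hr5 : List.range 5 = [0, 1, 2, 3, 4] := rfl
  rw [hr, hr5]
  simp only [List.foldl_cons, List.foldl_nil, List.map_cons, List.map_nil]
  have hset : ∀ (a b c d e : Option String),
      ((((((List.replicate 5 (none : Option String)).set 0 a).set 1 b).set 2 c).set 3 d).set 4 e)
        = [a, b, c, d, e] := fun _ _ _ _ _ => rfl
  rw [hset]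
  have ho0 := pyGetD_pvOrder (pvFreq S) 0 (by omega)
  have ho1 := pyGetD_pvOrder (pvFreq S) 1 (by omega)
  have ho2 := pyGetD_pvOrder (pvFreq S) 2 (by omega)
  have ho3 := pyGetD_pvOrder (pvFreq S) 3 (by omega)
  have ho4 := pyGetD_pvOrder (pvFreq S) 4 (by omega)
  simp at ho0 ho1 ho2 ho3 ho4
  simp [pvDec_eq, ho0, ho1, ho2, ho3, ho4]
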